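-- pv_equiv track=rewrite | github.com/MastewalB/a2sv-competitive-programming | Contest/Camp-Contest/C-11/hrt.py | solution
-- ===== SOURCE A (Python) =====
-- def find(x, arr):
--     if x == len(arr):
--         return -1
--     while arr[x] != x and arr[x] != -1:
--         arr[x] = arr[arr[x]]
--         x = arr[x]
--     return arr[x]
--
-- def solution(n, m, queries):
--
--     rows = [i for i in range(n)]
--     cols = [i for i in range(m)]
--
--     minRow = minCol = 0
--     res = []
--
--     for query in queries:
--         if query[0] == 0:
--             val = n * (minRow) + minCol
--             res.append(val)
--         elif query[0] == 1:
--             x = query[1]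
--             rows[x] = find(x + 1, rows)
--             if x == minRow:
--                 minRow = rows[x]
--         else:
--             x = query[1]
--             cols[x] = find(x + 1, cols)
--             if x == minCol:
--                 minCol = cols[x]
--
--     return res
-- ===== SOURCE B (Python) =====
-- def solution(n, m, queries):
--     row_removed = [False] * n
--     col_removed = [False] * m
--     minRow = minCol = 0
--     res = []
--     for query in queries:
--         if query[0] == 0:
--             res.append(n * minRow + minCol)
--         elif query[0] == 1:
--             x = query[1]
--             if x == minRow:
--                 minRow += 1
--                 while minRow < n and row_removed[minRow]:
--                     minRow += 1
--                 if minRow == n: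
--                     minRow = -1
--             row_removed[x] = True
--         else:
--             x = query[1]
--             if x == minCol:
--                 minCol += 1
--                 while minCol < m and col_removed[minCol]:
--                     minCol += 1
--                 if minCol == m:
--                     minCol = -1
--             col_removed[x] = True
--     return res
-- ===== Notes on version B (the rewrite author's own statement) =====
-- stated objective: simpler
-- what changed: Replaces the mutating union-find next-pointer structure with path halving by plain boolean removed-flag arrays plus a monotone forward scan of the minimum row/column pointer.
-- outside the precondition, e.g. on solution(2, 1, [[1, -1], [1, 0], [0]]): A returns [0], B returns [-2]; on solution(2, 2, [[1, 5]]): A raises IndexError, B raises IndexError; on solution(1, 1, [[]]): A raises IndexError, B raises IndexError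
import Mathlib
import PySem

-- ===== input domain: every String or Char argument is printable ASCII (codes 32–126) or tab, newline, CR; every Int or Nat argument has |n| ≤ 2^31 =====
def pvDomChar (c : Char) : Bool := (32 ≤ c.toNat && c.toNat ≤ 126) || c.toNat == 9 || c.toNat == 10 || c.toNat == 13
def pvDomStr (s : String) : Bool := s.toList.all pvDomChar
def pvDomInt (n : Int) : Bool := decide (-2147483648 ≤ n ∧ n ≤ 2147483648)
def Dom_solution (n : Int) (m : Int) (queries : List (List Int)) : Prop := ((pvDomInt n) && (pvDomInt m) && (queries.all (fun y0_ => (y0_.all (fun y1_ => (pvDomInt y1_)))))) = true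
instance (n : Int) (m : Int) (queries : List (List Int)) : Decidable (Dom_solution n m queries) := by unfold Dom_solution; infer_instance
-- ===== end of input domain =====

-- B replaces A's mutating union-find next-pointer search (with path halving) by boolean
-- removed-flag arrays and a monotone forward scan of the minimum row/column pointer (objective: simpler).
-- A mutates its local `rows`/`cols` lists only (not the arguments); return-value equivalence is proved.


-- ===== PORT A =====
-- Python's `find(x, arr)` while-loop, as fuel recursion (the fuel only guards totality:
-- under Pre_ pointers strictly increase, so fuel `arr.length + 2` is never exhausted).
-- All list accesses use the total pyGetD/pySetD forms; under Pre_ every index is in range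
-- (including the transient x = -1, which Python resolves by negative-index wraparound to the
-- last element, exactly as pyGetD does).
def findA : Nat → Int → List Int → List Int × Int
  | 0, _, arr => (arr, -1)  -- fuel exhausted: unreachable under Pre_
  | fuel+1, x, arr =>
    if x = PySem.List.len arr then (arr, -1)
    else if PySem.List.pyGetD arr x 0 ≠ x ∧ PySem.List.pyGetD arr x 0 ≠ -1 then
      -- arr[x] = arr[arr[x]];  x = arr[x]
      let arr' := PySem.List.pySetD arr x (PySem.List.pyGetD arr (PySem.List.pyGetD arr x 0) 0)
      findA fuel (PySem.List.pyGetD arr' x 0) arr'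
    else (arr, PySem.List.pyGetD arr x 0)

-- one iteration of A's `for query in queries` loop over the state (rows, cols, minRow, minCol, res)
def stepA (n : Int) (st : List Int × List Int × Int × Int × List Int) (query : List Int) :
    List Int × List Int × Int × Int × List Int :=
  let (rows, cols, minRow, minCol, res) := st
  let q0 := PySem.List.pyGetD query 0 0
  if q0 = 0 then
    (rows, cols, minRow, minCol, res ++ [n * minRow + minCol])
  else if q0 = 1 then
    let x := PySem.List.pyGetD query 1 0
    let fr := findA (rows.length + 2) (x + 1) rows
    let rows' := PySem.List.pySetD fr.1 x fr.2          -- rows[x] = find(x+1, rows)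
    let minRow' := if x = minRow then PySem.List.pyGetD rows' x 0 else minRow
    (rows', cols, minRow', minCol, res)
  else
    let x := PySem.List.pyGetD query 1 0
    let fc := findA (cols.length + 2) (x + 1) cols
    let cols' := PySem.List.pySetD fc.1 x fc.2          -- cols[x] = find(x+1, cols)
    let minCol' := if x = minCol then PySem.List.pyGetD cols' x 0 else minCol
    (rows, cols', minRow, minCol', res)

def solution (n : Int) (m : Int) (queries : List (List Int)) : List Int :=
  let rows := PySem.List.pyRange 0 n 1
  let cols := PySem.List.pyRange 0 m 1
  (queries.foldl (stepA n) (rows, cols, 0, 0, [])).2.2.2.2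

-- ===== PORT B =====
-- Python B's `minRow += 1; while minRow < n and removed[minRow]: minRow += 1; if minRow == n: minRow = -1`
def advanceB (removed : List Bool) (nn : Int) (k : Int) : Int :=
  if h : k < nn ∧ PySem.List.pyGetD removed k false then advanceB removed nn (k + 1)
  else if k = nn then -1 else k
termination_by (nn - k).toNat
decreasing_by omega

-- one iteration of B's loop over the state (rowRemoved, colRemoved, minRow, minCol, res)
def stepB (n : Int) (m : Int) (st : List Bool × List Bool × Int × Int × List Int) (query : List Int) :
    List Bool × List Bool × Int × Int × List Int :=
  let (rowR, colR, minRow, minCol, res) := st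
  let q0 := PySem.List.pyGetD query 0 0
  if q0 = 0 then
    (rowR, colR, minRow, minCol, res ++ [n * minRow + minCol])
  else if q0 = 1 then
    let x := PySem.List.pyGetD query 1 0
    let minRow' := if x = minRow then advanceB rowR n (minRow + 1) else minRow
    (PySem.List.pySetD rowR x true, colR, minRow', minCol, res)
  else
    let x := PySem.List.pyGetD query 1 0
    let minCol' := if x = minCol then advanceB colR m (minCol + 1) else minCol
    (rowR, PySem.List.pySetD colR x true, minRow, minCol', res)

def solution_alt (n : Int) (m : Int) (queries : List (List Int)) : List Int :=
  (queries.foldl (stepB n m) (List.replicate n.toNat false, List.replicate m.toNat false, 0, 0, [])).2.2.2.2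

-- ===== PRECONDITION & SPEC =====
-- Pre_ admits exactly the queries Python A completes without an IndexError and without negative-index
-- wraparound: each query is nonempty, and each removal query carries an in-range index 0 ≤ x < n (rows)
-- resp. 0 ≤ x < m (cols).  It excludes (a) inputs where A raises IndexError (empty query, removal index
-- out of range), and (b) removal indices -n ≤ x < 0, on which A still returns but the value is an
-- accident of Python's negative-index wraparound corrupting the next-pointer array (see cites).
def Pre_solution (n : Int) (m : Int) (queries : List (List Int)) : Prop :=
  ∀ q ∈ queries, q ≠ [] ∧
    (q.getD 0 0 = 0 ∨
      (2 ≤ q.length ∧ 0 ≤ q.getD 1 0 ∧ q.getD 1 0 < (if q.getD 0 0 = 1 then n else m)))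
instance (n : Int) (m : Int) (queries : List (List Int)) : Decidable (Pre_solution n m queries) := by
  unfold Pre_solution; infer_instance

def pvWitness_solution : Int × Int × List (List Int) :=
  (3, 3, [[0], [1, 0], [0], [2, 1], [0], [2, 0], [0], [1, 1], [1, 2], [0], [2, 2], [0]])

def Spec_solution (n : Int) (m : Int) (queries : List (List Int)) (out : List Int) : Prop := out = solution_alt n m queries
instance (n : Int) (m : Int) (queries : List (List Int)) (out : List Int) : Decidable (Spec_solution n m queries out) := by unfold Spec_solution; infer_instance

-- ===== CLAIM (what is proved, stated in full; the proofs are below) =====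
def Claim_equal_solution : Prop := ∀ (n : Int) (m : Int) (queries : List (List Int)), Dom_solution n m queries → Pre_solution n m queries → Spec_solution n m queries (solution n m queries)

-- ===== LEMMAS AND PROOFS =====

def ff (removed : List Bool) (k : Nat) : Int :=
  if h : k < removed.length then
    (if removed.getD k false then ff removed (k + 1) else (k : Int))
  else -1
termination_by removed.length - k

lemma ff_ge (removed : List Bool) (k : Nat) :
    ff removed k = -1 ∨
    ∃ v : Nat, ff removed k = (v : Int) ∧ k ≤ v ∧ v < removed.length ∧ removed.getD v false = false := by
  induction hn : removed.length - k using Nat.strong_induction_on generalizing k with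
  | _ n ih =>
    rw [ff]
    split
    · rename_i h
      split
      · exact (ih (removed.length - (k+1)) (by omega) (k+1) rfl).imp id
          (fun ⟨v, hv, h1, h2, h3⟩ => ⟨v, hv, by omega, h2, h3⟩)
      · rename_i hfree
        exact Or.inr ⟨k, rfl, le_refl _, h, by simpa using hfree⟩
    · exact Or.inl rfl

lemma ff_neg_all (removed : List Bool) (k : Nat) (h : ff removed k = -1) :
    ∀ i : Nat, k ≤ i → i < removed.length → removed.getD i false = true := by
  induction hn : removed.length - k using Nat.strong_induction_on generalizing k with
  | _ n ih =>
    intro i hki hi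
    rw [ff] at h
    rcases Nat.lt_or_ge k removed.length with hk | hk
    · rw [dif_pos hk] at h
      by_cases hr : removed.getD k false
      · rw [if_pos hr] at h
        rcases Nat.eq_or_lt_of_le hki with rfl | hlt
        · exact hr
        · exact ih (removed.length - (k+1)) (by omega) (k+1) h rfl i hlt hi
      · rw [if_neg hr] at h; omega
    · rw [dif_neg (by omega)] at h; omega

lemma set_eq_self_of_getD (removed : List Bool) (x : Nat) (h : removed.getD x false = true) :
    removed.set x true = removed := by
  apply List.ext_getElem?
  intro i
  rw [List.getElem?_set]
  split
  · rename_i hix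
    subst hix
    by_cases hx : x < removed.length
    · simp [List.getD, List.getElem?_eq_getElem hx] at h ⊢
      exact ⟨hx, h⟩
    · simp [List.getElem?_eq_none (le_of_not_gt hx)]; omega
  · rfl

lemma ff_set (removed : List Bool) (x : Nat) (hx : x < removed.length)
    (hfree : removed.getD x false = false) (k : Nat) :
    ff (removed.set x true) k = if ff removed k = (x : Int) then ff removed (x + 1) else ff removed k := by
  induction hn : removed.length - k using Nat.strong_induction_on generalizing k with
  | _ n ih =>
    rcases Nat.lt_or_ge k removed.length with hk | hk
    · by_cases hkx : k = x
      · subst hkx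
        have hset : (removed.set k true).getD k false = true := by
          simp [List.getD, hk]
        rw [ff, dif_pos (by simpa using hk), hset, if_pos rfl]
        rw [ih (removed.length - (k+1)) (by omega) (k+1) rfl]
        have h1 : ff removed k = (k : Int) := by
          rw [ff, dif_pos hk, if_neg (by simpa [List.getD] using hfree)]
        rw [if_pos h1]
        have : ff removed (k+1) ≠ (k : Int) := by
          rcases ff_ge removed (k+1) with h | ⟨v, hv, h1, h2, h3⟩
          · rw [h]; omega
          · rw [hv]; intro hc; omega
        rw [if_neg this]
      · have hset : (removed.set x true).getD k false = removed.getD k false := by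
          simp [List.getD, List.getElem?_set_ne (by omega : x ≠ k)]
        rw [ff, dif_pos (by simpa using hk), hset]
        by_cases hr : removed.getD k false
        · rw [if_pos hr, ih (removed.length - (k+1)) (by omega) (k+1) rfl]
          have h2 : ff removed k = ff removed (k+1) := by
            rw [ff, dif_pos hk, if_pos hr]
          rw [h2]
        · rw [if_neg hr]
          have h2 : ff removed k = (k : Int) := by
            rw [ff, dif_pos hk, if_neg hr]
          rw [h2, if_neg (by intro hc; exact hkx (by exact_mod_cast hc))]
    · have h1 : ff (removed.set x true) k = -1 := by
        rw [ff, dif_neg (by rw [List.length_set]; omega)]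
      have h2 : ff removed k = -1 := by rw [ff, dif_neg (by omega)]
      rw [h1, h2, if_neg (by omega)]

lemma advanceB_eq_ff (removed : List Bool) (nn k : Int) (h0 : 0 ≤ k) (hk : k ≤ nn)
    (hlen : (removed.length : Int) = nn) :
    advanceB removed nn k = ff removed k.toNat := by
  induction hn : (nn - k).toNat using Nat.strong_induction_on generalizing k with
  | _ n ih =>
    rw [advanceB, ff]
    rcases eq_or_lt_of_le hk with rfl | hlt
    · rw [dif_neg (by simp), if_pos rfl, dif_neg (by omega)]
    · have hkl : k.toNat < removed.length := by omega
      have hget : PySem.List.pyGetD removed k false = removed.getD k.toNat false := by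
        rw [PySem.List.pyGetD_eq_getElem removed false h0 (by omega)]
        simp [List.getD, List.getElem?_eq_getElem hkl]
      rw [dif_pos hkl]
      by_cases hr : removed.getD k.toNat false
      · rw [dif_pos ⟨hlt, by rw [hget]; exact hr⟩, if_pos hr,
          ih ((nn - (k+1)).toNat) (by omega) (k+1) (by omega) (by omega) rfl]
        congr 1; omega
      · rw [dif_neg (by rw [hget]; exact fun hc => hr hc.2), if_neg hr, if_neg (by omega)]
        omega

def ptrOK (rows : List Int) (removed : List Bool) (i : Nat) : Prop :=
  (rows.getD i 0 = -1 ∧ ff removed (i + 1) = -1) ∨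
  (∃ j : Nat, rows.getD i 0 = (j : Int) ∧ i < j ∧ j < removed.length ∧
    ff removed j = ff removed (i + 1))

def RelRC (rows : List Int) (removed : List Bool) : Prop :=
  rows.length = removed.length ∧
  ∀ i : Nat, i < removed.length →
    (removed.getD i false = false → rows.getD i 0 = (i : Int)) ∧
    (removed.getD i false = true → ptrOK rows removed i)

lemma ff_step (removed : List Bool) (k : Nat) (hk : k < removed.length)
    (hr : removed.getD k false = true) : ff removed k = ff removed (k + 1) := by
  rw [ff, dif_pos hk, if_pos hr]

lemma ff_free (removed : List Bool) (k : Nat) (hk : k < removed.length)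
    (hr : removed.getD k false = false) : ff removed k = (k : Int) := by
  rw [ff, dif_pos hk, if_neg (by rw [hr]; simp)]

lemma ff_end (removed : List Bool) (k : Nat) (hk : removed.length ≤ k) : ff removed k = -1 := by
  rw [ff, dif_neg (by omega)]

-- repoint a removed cell to any value consistent with ptrOK: the invariant survives

lemma RelRC_set_ptr (rows : List Int) (removed : List Bool) (x : Nat) (v : Int)
    (hrel : RelRC rows removed) (hx : x < removed.length) (hrem : removed.getD x false = true)
    (hv : (v = -1 ∧ ff removed (x + 1) = -1) ∨
      (∃ j : Nat, v = (j : Int) ∧ x < j ∧ j < removed.length ∧ ff removed j = ff removed (x + 1))) :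
    RelRC (rows.set x v) removed := by
  obtain ⟨hlen, hinv⟩ := hrel
  refine ⟨by rw [List.length_set]; exact hlen, fun i hi => ?_⟩
  by_cases hix : i = x
  · subst hix
    have hset : (rows.set i v).getD i 0 = v := by
      simp [List.getD, hlen ▸ hi]
    refine ⟨fun hc => absurd hrem (by rw [hc]; simp), fun _ => ?_⟩
    rcases hv with ⟨h1, h2⟩ | ⟨j, h1, h2, h3, h4⟩
    · exact Or.inl ⟨by rw [hset, h1], h2⟩
    · exact Or.inr ⟨j, by rw [hset, h1], h2, h3, h4⟩
  · have hset : (rows.set x v).getD i 0 = rows.getD i 0 := by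
      simp [List.getD, List.getElem?_set_ne (fun hc => hix hc.symm)]
    refine ⟨fun hf => by rw [hset]; exact (hinv i hi).1 hf, fun hr => ?_⟩
    rcases (hinv i hi).2 hr with ⟨h1, h2⟩ | ⟨j, h1, h2, h3, h4⟩
    · exact Or.inl ⟨by rw [hset, h1], h2⟩
    · exact Or.inr ⟨j, by rw [hset, h1], h2, h3, h4⟩

lemma RelRC_update (rows : List Int) (removed : List Bool) (x : Nat)
    (hrel : RelRC rows removed) (hx : x < removed.length) :
    RelRC (rows.set x (ff removed (x + 1))) (removed.set x true) := by
  by_cases hrem : removed.getD x false = true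
  · rw [set_eq_self_of_getD removed x hrem]
    refine RelRC_set_ptr rows removed x _ hrel hx hrem ?_
    rcases ff_ge removed (x + 1) with h | ⟨v, hv, h1, h2, h3⟩
    · exact Or.inl ⟨h, h⟩
    · exact Or.inr ⟨v, hv, by omega, h2, by rw [ff_free removed v h2 h3, hv]⟩
  · -- x was free: mark it; use ff_set to transport every ff equation
    have hfree : removed.getD x false = false := by simpa using hrem
    obtain ⟨hlen, hinv⟩ := hrel
    have hL : (removed.set x true).length = removed.length := List.length_set ..
    refine ⟨by rw [List.length_set, List.length_set]; exact hlen, fun i hi => ?_⟩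
    rw [hL] at hi
    by_cases hix : i = x
    · subst hix
      have hset : (rows.set i (ff removed (i+1))).getD i 0 = ff removed (i+1) := by
        simp [List.getD, hlen ▸ hi]
      have hrm : (removed.set i true).getD i false = true := by
        simp [List.getD, hi]
      refine ⟨fun hc => absurd (hrm.symm.trans hc) (by simp), fun _ => ?_⟩
      have hff1 : ff (removed.set i true) (i + 1) = ff removed (i + 1) := by
        rw [ff_set removed i hi hfree (i + 1)]
        rcases ff_ge removed (i + 1) with h | ⟨v, hv, h1, h2, h3⟩
        · rw [h, if_neg (by omega)]
        · rw [hv, if_neg (by intro hc; exact absurd (by exact_mod_cast hc) (by omega : ¬ v = i))]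
      rcases ff_ge removed (i + 1) with h | ⟨v, hv, h1, h2, h3⟩
      · exact Or.inl ⟨by rw [hset, h], by rw [hff1, h]⟩
      · refine Or.inr ⟨v, by rw [hset, hv], by omega, by rw [hL]; exact h2, ?_⟩
        have h5 : (removed.set i true).getD v false = false := by
          have he : (removed.set i true).getD v false = removed.getD v false := by
            simp [List.getD, List.getElem?_set_ne (by omega : i ≠ v)]
          rw [he, h3]
        rw [hff1, hv, ff_free (removed.set i true) v (by rw [hL]; exact h2) h5]
    · have hset : (rows.set x (ff removed (x+1))).getD i 0 = rows.getD i 0 := by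
        simp [List.getD, List.getElem?_set_ne (fun hc => hix hc.symm)]
      have hrm : (removed.set x true).getD i false = removed.getD i false := by
        simp [List.getD, List.getElem?_set_ne (fun hc => hix hc.symm)]
      refine ⟨fun hf => by rw [hset]; exact (hinv i hi).1 (hrm ▸ hf), fun hr => ?_⟩
      rcases (hinv i hi).2 (hrm ▸ hr) with ⟨h1, h2⟩ | ⟨j, h1, h2, h3, h4⟩
      · refine Or.inl ⟨by rw [hset, h1], ?_⟩
        rw [ff_set removed x hx hfree (i + 1), h2, if_neg (by omega)]
      · refine Or.inr ⟨j, by rw [hset, h1], h2, by rw [hL]; exact h3, ?_⟩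
        rw [ff_set removed x hx hfree j, ff_set removed x hx hfree (i + 1), h4]

lemma findA_neg_one (fuel : Nat) (arr : List Int) (h : arr ≠ [])
    (hl : arr.getD (arr.length - 1) 0 = -1) : findA (fuel + 1) (-1) arr = (arr, -1) := by
  have hL : 0 < arr.length := List.length_pos_iff.mpr h
  have hget : PySem.List.pyGetD arr (-1) 0 = -1 := by
    rw [PySem.List.pyGetD_neg_one arr 0 h, List.getLast_eq_getElem]
    rw [List.getD_eq_getElem arr 0 (by omega)] at hl
    exact hl
  simp only [findA]
  rw [if_neg (by rw [PySem.List.len_eq]; omega), if_neg (by rw [hget]; simp), hget]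

lemma findA_go (fuel : Nat) (x : Nat) (rows : List Int) (removed : List Bool)
    (hrel : RelRC rows removed) (hx : x ≤ rows.length) (hfuel : rows.length + 1 - x ≤ fuel) :
    (findA fuel (x : Int) rows).2 = ff removed x ∧ RelRC (findA fuel (x : Int) rows).1 removed := by
  induction fuel generalizing x rows with
  | zero => omega
  | succ f ih =>
    obtain ⟨hlen, hinv⟩ := hrel
    by_cases hxL : x = rows.length
    · subst hxL
      simp only [findA]
      rw [if_pos (by rw [PySem.List.len_eq]), ff_end removed _ (by omega)]
      exact ⟨rfl, hlen, hinv⟩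
    · have hxlt : x < rows.length := by omega
      have hxr : x < removed.length := by omega
      have hget : PySem.List.pyGetD rows ((x : Nat) : Int) 0 = rows.getD x 0 :=
        PySem.List.pyGetD_natCast ..
      by_cases hrm : removed.getD x false = true
      · rcases (hinv x hxr).2 hrm with ⟨h1, h2⟩ | ⟨j, hj, hxj, hjL, hjf⟩
        · -- rows[x] = -1: loop exits, returns -1
          simp only [findA]
          rw [if_neg (by rw [PySem.List.len_eq]; exact_mod_cast hxL),
            if_neg (by rw [hget, h1]; simp), hget, h1, ff_step removed x hxr hrm, h2]
          exact ⟨rfl, hlen, hinv⟩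
        · -- rows[x] = j: one halving step
          have hwget : PySem.List.pyGetD rows ((j : Nat) : Int) 0 = rows.getD j 0 :=
            PySem.List.pyGetD_natCast ..
          set w := rows.getD j 0 with hw
          have harr' : PySem.List.pySetD rows ((x : Nat) : Int) w = rows.set x w :=
            PySem.List.pySetD_natCast ..
          have hlen' : (rows.set x w).length = rows.length := List.length_set ..
          have hx' : (rows.set x w).getD x 0 = w := by
            simp [List.getD, hxlt]
          have Hv : (w = -1 ∧ ff removed (x + 1) = -1) ∨
              (∃ j2 : Nat, w = (j2 : Int) ∧ x < j2 ∧ j2 < removed.length ∧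
                ff removed j2 = ff removed (x + 1)) := by
            by_cases hrj : removed.getD j false = true
            · rcases (hinv j hjL).2 hrj with ⟨g1, g2⟩ | ⟨j2, gj, gjj, gjL, gjf⟩
              · exact Or.inl ⟨g1, by rw [← hjf, ff_step removed j hjL hrj]; exact g2⟩
              · exact Or.inr ⟨j2, gj, by omega, gjL,
                  by rw [gjf, ← ff_step removed j hjL hrj, hjf]⟩
            · exact Or.inr ⟨j, (hinv j hjL).1 (by simpa using hrj), hxj, hjL, hjf⟩
          have hrel' : RelRC (rows.set x w) removed :=
            RelRC_set_ptr rows removed x w ⟨hlen, hinv⟩ hxr hrm Hv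
          have hstep : findA (f + 1) ((x : Nat) : Int) rows
              = findA f ((rows.set x w).getD x 0) (rows.set x w) := by
            simp only [findA]
            rw [if_neg (by rw [PySem.List.len_eq]; exact_mod_cast hxL),
              if_pos ⟨by rw [hget, hj]; exact_mod_cast (by omega : (j:Int) ≠ (x:Int)),
                by rw [hget, hj]; exact_mod_cast (by omega : (j:Int) ≠ (-1:Int))⟩]
            rw [hget, hj, hwget, harr', PySem.List.pyGetD_natCast]
          rcases Hv with ⟨hw1, hff1⟩ | ⟨j2, hw2, hxj2, hj2L, hfj2⟩
          · -- new pointer is -1: next iteration reads arr[-1] (= last cell = -1) and stops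
            obtain ⟨f', rfl⟩ : ∃ f', f = f' + 1 := ⟨f - 1, by omega⟩
            have hne : rows.set x w ≠ [] :=
              List.ne_nil_of_length_pos (by rw [hlen']; omega)
            have hlast : (rows.set x w).getD ((rows.set x w).length - 1) 0 = -1 := by
              rw [hlen']
              have hxlast : x ≠ rows.length - 1 := by omega
              have hgl : (rows.set x w).getD (rows.length - 1) 0 = rows.getD (rows.length - 1) 0 := by
                simp [List.getD, List.getElem?_set_ne (fun hc => hxlast hc)]
              rw [hgl]
              by_cases hjlast : j = rows.length - 1
              · rw [← hjlast]; exact hw.symm.trans hw1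
              · have hrml : removed.getD (rows.length - 1) false = true :=
                  ff_neg_all removed (x + 1) hff1 _ (by omega) (by omega)
                rcases (hinv (rows.length - 1) (by omega)).2 hrml with ⟨g1, _⟩ | ⟨j3, _, gjj, gjL, _⟩
                · exact g1
                · omega
            rw [hw1] at hne hlast hrel'
            rw [hstep, hx', hw1, findA_neg_one f' (rows.set x (-1)) hne hlast]
            exact ⟨by rw [ff_step removed x hxr hrm, hff1], hrel'⟩
          · -- new pointer is j2: recurse
            have hih := ih j2 (rows.set x w) hrel' (by omega) (by omega)
            rw [hw2] at hih
            rw [hstep, hx', hw2]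
            refine ⟨?_, hih.2⟩
            rw [hih.1, hfj2, ff_step removed x hxr hrm]
      · -- x is free: arr[x] == x, the loop exits returning x
        have hfx : rows.getD x 0 = (x : Int) := (hinv x hxr).1 (by simpa using hrm)
        simp only [findA]
        rw [if_neg (by rw [PySem.List.len_eq]; exact_mod_cast hxL),
          if_neg (by rw [hget, hfx]; simp), hget, hfx,
          ff_free removed x hxr (by simpa using hrm)]
        exact ⟨rfl, hlen, hinv⟩

def StInv (n m : Int) (stA : List Int × List Int × Int × Int × List Int)
    (stB : List Bool × List Bool × Int × Int × List Int) : Prop :=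
  RelRC stA.1 stB.1 ∧ RelRC stA.2.1 stB.2.1 ∧
  (stB.1.length : Int) = max n 0 ∧ (stB.2.1.length : Int) = max m 0 ∧
  stA.2.2.1 = stB.2.2.1 ∧ stA.2.2.2.1 = stB.2.2.2.1 ∧ stA.2.2.2.2 = stB.2.2.2.2

-- one axis (rows or cols) of a removal step

lemma axis_update (rows : List Int) (removed : List Bool) (NN : Int) (x mv : Int)
    (hrel : RelRC rows removed) (hlen : (removed.length : Int) = max NN 0)
    (hx0 : 0 ≤ x) (hxn : x < NN) :
    RelRC (PySem.List.pySetD (findA (rows.length + 2) (x + 1) rows).1 x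
        (findA (rows.length + 2) (x + 1) rows).2) (PySem.List.pySetD removed x true) ∧
    ((PySem.List.pySetD removed x true).length : Int) = max NN 0 ∧
    (if x = mv then PySem.List.pyGetD (PySem.List.pySetD (findA (rows.length + 2) (x + 1) rows).1 x
        (findA (rows.length + 2) (x + 1) rows).2) x 0 else mv)
      = (if x = mv then advanceB removed NN (mv + 1) else mv) := by
  have hL : removed.length = rows.length := hrel.1.symm
  obtain ⟨xN, rfl⟩ : ∃ xN : Nat, x = (xN : Int) := ⟨x.toNat, by omega⟩
  have hxN : xN < removed.length := by omega
  have hx1 : (xN : Int) + 1 = ((xN + 1 : Nat) : Int) := by push_cast; ring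
  have hgo := findA_go (rows.length + 2) (xN + 1) rows removed hrel (by omega) (by omega)
  rw [hx1]
  set fr := findA (rows.length + 2) ((xN + 1 : Nat) : Int) rows with hfr
  have hfrlen : fr.1.length = removed.length := hgo.2.1
  have hset1 : PySem.List.pySetD fr.1 (xN : Int) fr.2 = fr.1.set xN (ff removed (xN + 1)) := by
    rw [PySem.List.pySetD_natCast, hgo.1]
  have hset2 : PySem.List.pySetD removed (xN : Int) true = removed.set xN true :=
    PySem.List.pySetD_natCast ..
  refine ⟨?_, ?_, ?_⟩
  · rw [hset1, hset2]
    exact RelRC_update fr.1 removed xN hgo.2 hxN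
  · rw [hset2, List.length_set]; exact hlen
  · by_cases hxm : (xN : Int) = mv
    · rw [if_pos hxm, if_pos hxm, hset1, PySem.List.pyGetD_natCast, ← hxm]
      have hg : (fr.1.set xN (ff removed (xN + 1))).getD xN 0 = ff removed (xN + 1) := by
        simp [List.getD, hfrlen ▸ hxN]
      rw [hg, advanceB_eq_ff removed NN ((xN : Int) + 1) (by omega) (by omega) (by omega)]
      have ht : ((xN : Int) + 1).toNat = xN + 1 := by omega
      rw [ht]
    · rw [if_neg hxm, if_neg hxm]

lemma step_preserves (n m : Int) (q : List Int) (stA : List Int × List Int × Int × Int × List Int)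
    (stB : List Bool × List Bool × Int × Int × List Int)
    (hq : q ≠ [] ∧ (q.getD 0 0 = 0 ∨
      (2 ≤ q.length ∧ 0 ≤ q.getD 1 0 ∧ q.getD 1 0 < (if q.getD 0 0 = 1 then n else m))))
    (h : StInv n m stA stB) : StInv n m (stepA n stA q) (stepB n m stB q) := by
  obtain ⟨rows, cols, mA, cA, resA⟩ := stA
  obtain ⟨rowR, colR, mB, cB, resB⟩ := stB
  obtain ⟨h1, h2, h3, h4, h5, h6, h7⟩ := h
  simp only at h1 h2 h3 h4 h5 h6 h7
  subst h5 h6 h7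
  have hq0 : PySem.List.pyGetD q 0 0 = q.getD 0 0 := PySem.List.pyGetD_natCast q 0 0
  have hq1 : PySem.List.pyGetD q 1 0 = q.getD 1 0 := PySem.List.pyGetD_natCast q 1 0
  unfold stepA stepB
  simp only [hq0, hq1]
  by_cases hz : q.getD 0 0 = 0
  · simp only [if_pos hz]
    exact ⟨h1, h2, h3, h4, rfl, rfl, rfl⟩
  · rcases hq.2 with hc | ⟨hlen2, hx0, hxlt⟩
    · exact absurd hc hz
    · simp only [if_neg hz]
      by_cases ho : q.getD 0 0 = 1
      · simp only [if_pos ho]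
        rw [if_pos ho] at hxlt
        have := axis_update rows rowR n (q.getD 1 0) mA h1 h3 hx0 hxlt
        exact ⟨this.1, h2, this.2.1, h4, this.2.2, rfl, rfl⟩
      · simp only [if_neg ho]
        rw [if_neg ho] at hxlt
        have := axis_update cols colR m (q.getD 1 0) cA h2 h4 hx0 hxlt
        exact ⟨h1, this.1, h3, this.2.1, rfl, this.2.2, rfl⟩

lemma StInv_init (n m : Int) :
    StInv n m (PySem.List.pyRange 0 n 1, PySem.List.pyRange 0 m 1, 0, 0, [])
      (List.replicate n.toNat false, List.replicate m.toNat false, 0, 0, []) := by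
  have base : ∀ k : Int, RelRC (PySem.List.pyRange 0 k 1) (List.replicate k.toNat false) := by
    intro k
    constructor
    · rw [PySem.List.length_pyRange_one, List.length_replicate]; omega
    · intro i hi
      rw [List.length_replicate] at hi
      constructor
      · intro _
        rw [PySem.List.pyRange_one]
        rw [List.getD_eq_getElem _ _ (by simp; omega)]
        simp
      · intro hc
        rw [List.getD_eq_getElem _ _ (by simpa using hi)] at hc
        simp at hc
  refine ⟨base n, base m, ?_, ?_, rfl, rfl, rfl⟩ <;> · simp only [List.length_replicate]; omega

lemma fold_preserves (n m : Int) (queries : List (List Int)) (stA) (stB)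
    (hpre : ∀ q ∈ queries, q ≠ [] ∧ (q.getD 0 0 = 0 ∨
      (2 ≤ q.length ∧ 0 ≤ q.getD 1 0 ∧ q.getD 1 0 < (if q.getD 0 0 = 1 then n else m))))
    (h : StInv n m stA stB) :
    StInv n m (queries.foldl (stepA n) stA) (queries.foldl (stepB n m) stB) := by
  induction queries generalizing stA stB with
  | nil => exact h
  | cons q qs ih =>
    exact ih _ _ (fun r hr => hpre r (List.mem_cons_of_mem _ hr))
      (step_preserves n m q stA stB (hpre q List.mem_cons_self) h)

-- ===== VERDICT (by name: the statement is the Claim_ definition above) =====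
theorem solution_spec : Claim_equal_solution := by
  intro n m queries _ hpre
  unfold Spec_solution solution solution_alt
  exact (fold_preserves n m queries _ _ hpre (StInv_init n m)).2.2.2.2.2.2
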